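-- pv_equiv track=rewrite | github.com/Bhanuteja005/ai-agent-AutoParser | agent.py | analyze_failure
-- ===== SOURCE A (Python) =====
-- def analyze_failure(test_output: str) -> str:
--     """
--     Analyze test failure and create summary for next iteration.
--
--     Args:
--         test_output: Output from pytest
--
--     Returns:
--         Failure summary
--     """
--     summary_parts = []
--
--     # Extract error type
--     if "ImportError" in test_output or "ModuleNotFoundError" in test_output:
--         summary_parts.append("ERROR TYPE: Import Error")
--         summary_parts.append("Issue: Failed to import required modules")
--     elif "AttributeError" in test_output:
--         summary_parts.append("ERROR TYPE: Attribute Error")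
--         summary_parts.append("Issue: Missing expected function or attribute")
--     elif "KeyError" in test_output:
--         summary_parts.append("ERROR TYPE: Key Error")
--         summary_parts.append("Issue: Missing expected column or key")
--     elif "AssertionError" in test_output:
--         summary_parts.append("ERROR TYPE: Assertion Error")
--         summary_parts.append("Issue: Output doesn't match expected result")
--     elif "SyntaxError" in test_output:
--         summary_parts.append("ERROR TYPE: Syntax Error")
--         summary_parts.append("Issue: Invalid Python syntax in generated code")
--     else:
--         summary_parts.append("ERROR TYPE: Unknown")
--
--     # Extract relevant error messages
--     lines = test_output.split("\n")
--     error_lines = []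
--     capture = False
--
--     for line in lines:
--         if "FAILED" in line or "ERROR" in line or "assert" in line.lower():
--             capture = True
--         if capture:
--             error_lines.append(line)
--             if len(error_lines) > 20:  # Limit lines
--                 break
--
--     if error_lines:
--         summary_parts.append("\nERROR DETAILS:")
--         summary_parts.append("\n".join(error_lines[:20]))
--
--     summary = "\n".join(summary_parts)
--     return summary
-- ===== SOURCE B (Python) =====
-- def analyze_failure(test_output: str) -> str:
--     table = [
--         (("ImportError", "ModuleNotFoundError"),
--          ("ERROR TYPE: Import Error", "Issue: Failed to import required modules")),
--         (("AttributeError",),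
--          ("ERROR TYPE: Attribute Error", "Issue: Missing expected function or attribute")),
--         (("KeyError",),
--          ("ERROR TYPE: Key Error", "Issue: Missing expected column or key")),
--         (("AssertionError",),
--          ("ERROR TYPE: Assertion Error", "Issue: Output doesn't match expected result")),
--         (("SyntaxError",),
--          ("ERROR TYPE: Syntax Error", "Issue: Invalid Python syntax in generated code")),
--     ]
--     parts = next((list(msg) for markers, msg in table
--                   if any(m in test_output for m in markers)),
--                  ["ERROR TYPE: Unknown"])
--     lines = test_output.split("\n")
--     i = next((k for k, line in enumerate(lines)
--               if "FAILED" in line or "ERROR" in line or "assert" in line.lower()),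
--              None)
--     if i is not None:
--         parts.append("\nERROR DETAILS:")
--         parts.append("\n".join(lines[i:i + 20]))
--     return "\n".join(parts)
-- ===== Notes on version B (the rewrite author's own statement) =====
-- stated objective: simpler
-- what changed: The if/elif chain becomes an ordered marker->message lookup table scanned for the first match, and the capture-flag accumulation loop is replaced by computing the first triggering line index with next/enumerate and slicing lines[i:i+20].
import Mathlib
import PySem

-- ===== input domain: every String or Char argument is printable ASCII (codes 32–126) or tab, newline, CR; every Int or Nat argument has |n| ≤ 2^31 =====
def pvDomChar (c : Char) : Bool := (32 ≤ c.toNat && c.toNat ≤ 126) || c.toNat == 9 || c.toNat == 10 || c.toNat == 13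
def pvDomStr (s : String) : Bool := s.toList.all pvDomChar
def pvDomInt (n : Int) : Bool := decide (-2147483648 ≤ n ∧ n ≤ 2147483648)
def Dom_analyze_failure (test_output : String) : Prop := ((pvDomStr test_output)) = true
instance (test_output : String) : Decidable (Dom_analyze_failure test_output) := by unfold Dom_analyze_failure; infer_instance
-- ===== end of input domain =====

-- B replaces A's if/elif chain by an ordered lookup table and A's capture-flag loop by
-- first-trigger-index + slice; objective: simpler. Return values are proved identical.

-- ===== PORT A =====
-- '"FAILED" in line or "ERROR" in line or "assert" in line.lower()'
def aTrigger (line : String) : Bool :=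
  PySem.Str.isIn "FAILED" line || PySem.Str.isIn "ERROR" line ||
  PySem.Str.isIn "assert" (PySem.Str.lower line)

-- the for-loop over lines with its capture flag, error_lines accumulator and the break at len > 20
def aCollect : List String → Bool → List String → List String
  | [], _, acc => acc
  | l :: ls, capture, acc =>
    let capture := capture || aTrigger l
    if capture then
      let acc := acc ++ [l]
      if acc.length > 20 then acc else aCollect ls capture acc
    else aCollect ls capture acc

def analyze_failure (test_output : String) : String :=
  let summary_parts : List String :=
    if PySem.Str.isIn "ImportError" test_output || PySem.Str.isIn "ModuleNotFoundError" test_output then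
      ["ERROR TYPE: Import Error", "Issue: Failed to import required modules"]
    else if PySem.Str.isIn "AttributeError" test_output then
      ["ERROR TYPE: Attribute Error", "Issue: Missing expected function or attribute"]
    else if PySem.Str.isIn "KeyError" test_output then
      ["ERROR TYPE: Key Error", "Issue: Missing expected column or key"]
    else if PySem.Str.isIn "AssertionError" test_output then
      ["ERROR TYPE: Assertion Error", "Issue: Output doesn't match expected result"]
    else if PySem.Str.isIn "SyntaxError" test_output then
      ["ERROR TYPE: Syntax Error", "Issue: Invalid Python syntax in generated code"]
    else
      ["ERROR TYPE: Unknown"]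
  let lines := (PySem.Str.split? test_output "\n").getD []  -- sep "\n" ≠ "", so split? is `some` here
  let error_lines := aCollect lines false []
  let summary_parts :=
    if error_lines ≠ [] then
      summary_parts ++ ["\nERROR DETAILS:", PySem.Str.join "\n" (error_lines.take 20)]
    else summary_parts
  PySem.Str.join "\n" summary_parts

-- ===== PORT B =====
def bTable : List (List String × List String) :=
  [ (["ImportError", "ModuleNotFoundError"],
     ["ERROR TYPE: Import Error", "Issue: Failed to import required modules"]),
    (["AttributeError"],
     ["ERROR TYPE: Attribute Error", "Issue: Missing expected function or attribute"]),
    (["KeyError"],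
     ["ERROR TYPE: Key Error", "Issue: Missing expected column or key"]),
    (["AssertionError"],
     ["ERROR TYPE: Assertion Error", "Issue: Output doesn't match expected result"]),
    (["SyntaxError"],
     ["ERROR TYPE: Syntax Error", "Issue: Invalid Python syntax in generated code"]) ]

-- next((list(msg) for markers, msg in table if any(m in test_output for m in markers)), ["ERROR TYPE: Unknown"])
def bHeader : List (List String × List String) → String → List String
  | [], _ => ["ERROR TYPE: Unknown"]
  | (markers, msg) :: rest, t =>
    if markers.any (fun m => PySem.Str.isIn m t) then msg else bHeader rest t

def bTrigger (line : String) : Bool :=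
  PySem.Str.isIn "FAILED" line || PySem.Str.isIn "ERROR" line ||
  PySem.Str.isIn "assert" (PySem.Str.lower line)

-- next((k for k, line in enumerate(lines) if <trigger>), None)
def bFirstIdx : List String → Nat → Option Nat
  | [], _ => none
  | l :: ls, k => if bTrigger l then some k else bFirstIdx ls (k + 1)

def analyze_failure_alt (test_output : String) : String :=
  let parts := bHeader bTable test_output
  let lines := (PySem.Str.split? test_output "\n").getD []  -- sep "\n" ≠ "", so split? is `some` here
  let parts :=
    match bFirstIdx lines 0 with
    | none => parts
    -- lines[i:i+20] with 0 ≤ i < len(lines): exactly take 20 of drop i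
    | some i => parts ++ ["\nERROR DETAILS:", PySem.Str.join "\n" ((lines.drop i).take 20)]
  PySem.Str.join "\n" parts

-- ===== PRECONDITION & SPEC =====
def Spec_analyze_failure (test_output : String) (out : String) : Prop := out = analyze_failure_alt test_output
instance (test_output : String) (out : String) : Decidable (Spec_analyze_failure test_output out) := by unfold Spec_analyze_failure; infer_instance

-- ===== CLAIM (what is proved, stated in full; the proofs are below) =====
def Claim_equal_analyze_failure : Prop := ∀ (test_output : String), Dom_analyze_failure test_output → Spec_analyze_failure test_output (analyze_failure test_output)

-- ===== LEMMAS AND PROOFS =====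

-- once capture is true, A keeps appending and breaks after the 21st collected line
theorem aCollect_true (ls : List String) : ∀ acc : List String, acc.length ≤ 20 →
    aCollect ls true acc = acc ++ ls.take (21 - acc.length) := by
  induction ls with
  | nil => intro acc _; simp [aCollect]
  | cons l ls ih =>
    intro acc hacc
    simp only [aCollect, Bool.true_or, if_pos]
    by_cases h : acc.length + 1 > 20
    · have : acc.length = 20 := by omega
      simp [this, List.take]
    · rw [if_neg (by simpa using h), ih _ (by simpa using h)]
      have h21 : 21 - acc.length = (20 - acc.length) + 1 := by omega
      simp [h21, List.take_succ_cons]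

theorem bFirstIdx_shift (ls : List String) : ∀ k : Nat,
    bFirstIdx ls k = (bFirstIdx ls 0).map (· + k) := by
  induction ls with
  | nil => intro k; simp [bFirstIdx]
  | cons l ls ih =>
    intro k
    by_cases h : bTrigger l
    · simp [bFirstIdx, h]
    · simp only [bFirstIdx, h, Bool.false_eq_true, not_false_eq_true, if_neg]
      rw [ih (k + 1), ih 1, Option.map_map]
      cases bFirstIdx ls 0
      · simp
      · simp; omega

theorem aCollect_eq_firstIdx (ls : List String) :
    aCollect ls false [] =
      match bFirstIdx ls 0 with
      | none => []
      | some i => (ls.drop i).take 21 := by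
  induction ls with
  | nil => simp [aCollect, bFirstIdx]
  | cons l ls ih =>
    by_cases h : aTrigger l
    · have hb : bTrigger l = true := h
      simp [aCollect, bFirstIdx, h, hb, aCollect_true ls [l] (by simp)]
    · have hb : bTrigger l = false := by simpa [bTrigger, aTrigger] using h
      simp only [aCollect, bFirstIdx, h, hb, Bool.false_or, Bool.false_eq_true,
        not_false_eq_true, if_neg]
      rw [ih, bFirstIdx_shift ls 1]
      cases hfi : bFirstIdx ls 0 with
      | none => simp
      | some i => simp

theorem bFirstIdx_lt (ls : List String) : ∀ i : Nat, bFirstIdx ls 0 = some i → i < ls.length := by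
  induction ls with
  | nil => intro i h; simp [bFirstIdx] at h
  | cons l ls ih =>
    intro i h
    by_cases ht : bTrigger l
    · simp only [bFirstIdx, ht, if_pos, Option.some.injEq] at h
      simp only [List.length_cons]; omega
    · simp only [bFirstIdx, ht, Bool.false_eq_true, not_false_eq_true, if_neg] at h
      rw [bFirstIdx_shift ls 1] at h
      cases hfi : bFirstIdx ls 0 with
      | none => simp [hfi] at h
      | some j =>
        have := ih j hfi
        simp only [hfi, Option.map_some, Option.some.injEq] at h
        simp only [List.length_cons]; omega

theorem bHeader_eq_chain (t : String) : bHeader bTable t =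
    (if PySem.Str.isIn "ImportError" t || PySem.Str.isIn "ModuleNotFoundError" t then
      ["ERROR TYPE: Import Error", "Issue: Failed to import required modules"]
    else if PySem.Str.isIn "AttributeError" t then
      ["ERROR TYPE: Attribute Error", "Issue: Missing expected function or attribute"]
    else if PySem.Str.isIn "KeyError" t then
      ["ERROR TYPE: Key Error", "Issue: Missing expected column or key"]
    else if PySem.Str.isIn "AssertionError" t then
      ["ERROR TYPE: Assertion Error", "Issue: Output doesn't match expected result"]
    else if PySem.Str.isIn "SyntaxError" t then
      ["ERROR TYPE: Syntax Error", "Issue: Invalid Python syntax in generated code"]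
    else ["ERROR TYPE: Unknown"]) := by
  simp only [bHeader, bTable, List.any, Bool.or_false]

-- ===== VERDICT (by name: the statement is the Claim_ definition above) =====
theorem analyze_failure_spec : Claim_equal_analyze_failure := by
  intro t _
  simp only [Spec_analyze_failure, analyze_failure, analyze_failure_alt]
  rw [bHeader_eq_chain, aCollect_eq_firstIdx]
  cases hfi : bFirstIdx ((PySem.Str.split? t "\n").getD []) 0 with
  | none => simp
  | some i =>
    have hi := bFirstIdx_lt _ i hfi
    have hne : ((((PySem.Str.split? t "\n").getD []).drop i).take 21) ≠ [] := by
      simp [List.drop_eq_nil_iff]; omega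
    simp [hne, List.take_take]
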